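-- pv_equiv track=rewrite | github.com/descampsk/advent-of-code | 2021/AxxLaMenace/21/main.py | compute_victories
-- ===== SOURCE A (Python) =====
-- def compute_victories(d1, d2):
--     d1 = dict(sorted(d1.items(), key=lambda item: -item[0]))
--     d2 = dict(sorted(d2.items(), key=lambda item: -item[0]))
--     nb_vic = 0
--     for k1 in d1:
--         reduce_value = 0
--         for k2 in d2:
--             if k2>=k1:
--                 reduce_value += d2[k2]
--                 reduce_value //= 27
--         nb_vic += reduce_value*d1[k1]
--     return nb_vic
-- ===== SOURCE B (Python) =====
-- def compute_victories(d1, d2):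
--     # Sort both item lists by descending key once, then one two-pointer pass:
--     # for decreasing thresholds k1 the set {k2 >= k1} only grows by a prefix of
--     # the descending items2, so the truncating fold is extended incrementally.
--     items1 = sorted(d1.items(), key=lambda item: -item[0])
--     items2 = sorted(d2.items(), key=lambda item: -item[0])
--     total = 0
--     acc = 0
--     j = 0
--     for k1, v1 in items1:
--         while j < len(items2) and items2[j][0] >= k1:
--             acc = (acc + items2[j][1]) // 27
--             j += 1
--         total += acc * v1
--     return total
-- ===== Notes on version B (the rewrite author's own statement) =====
-- stated objective: faster
-- what changed: Replaces A's inner rescan of all of d2 for every key of d1 with one shared two-pointer pass: both item lists are sorted by descending key once, and since lower thresholds only extend the >=-threshold prefix of the descending d2, the truncating fold ((acc+v)//27) is maintained incrementally instead of recomputed from scratch per key.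
import Mathlib
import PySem

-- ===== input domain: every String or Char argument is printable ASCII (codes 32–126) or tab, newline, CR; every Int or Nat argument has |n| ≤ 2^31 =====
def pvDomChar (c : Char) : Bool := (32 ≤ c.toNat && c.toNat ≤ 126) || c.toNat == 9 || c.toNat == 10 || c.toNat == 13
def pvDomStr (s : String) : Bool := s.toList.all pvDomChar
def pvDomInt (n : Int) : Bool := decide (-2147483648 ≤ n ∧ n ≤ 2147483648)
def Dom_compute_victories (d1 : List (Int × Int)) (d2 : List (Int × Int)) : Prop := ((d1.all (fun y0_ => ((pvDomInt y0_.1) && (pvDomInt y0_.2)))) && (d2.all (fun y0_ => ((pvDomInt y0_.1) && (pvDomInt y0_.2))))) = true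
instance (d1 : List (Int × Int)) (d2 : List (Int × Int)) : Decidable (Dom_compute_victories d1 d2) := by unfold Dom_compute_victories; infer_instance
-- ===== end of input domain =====

-- ===== PORT A =====
-- B replaces A's quadratic per-threshold rescan of d2 with one sorted two-pointer
-- pass extending the truncating fold incrementally (objective: faster).
-- NOTE on the port: Python's `for k in d: … d[k] …` over a dict is ported as a fold
-- over the dict's items() — the keys in order, each with its looked-up value.
def compute_victories (d1 : List (Int × Int)) (d2 : List (Int × Int)) : Int :=
  let s1 := PySem.List.sorted (PySem.Dict.ofList d1).items (fun item => -item.1) false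
  let s2 := PySem.List.sorted (PySem.Dict.ofList d2).items (fun item => -item.1) false
  s1.foldl (fun nb_vic p1 =>
    nb_vic +
      (s2.foldl (fun reduce_value p2 =>
        if p2.1 ≥ p1.1 then PySem.Int.floordiv (reduce_value + p2.2) 27 else reduce_value) 0)
      * p1.2) 0

-- ===== PORT B =====
-- the inner `while` loop of Source B: consume items2 while its head key is ≥ k1,
-- folding each consumed value into acc; returns (final acc, remaining items2)
def cvAdvance (k1 : Int) : List (Int × Int) → Int → Int × List (Int × Int)
  | [], acc => (acc, [])
  | p :: rest, acc =>
      if p.1 ≥ k1 then cvAdvance k1 rest (PySem.Int.floordiv (acc + p.2) 27)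
      else (acc, p :: rest)

-- the main `for k1, v1 in items1` loop of Source B
def cvLoop : List (Int × Int) → List (Int × Int) → Int → Int → Int
  | [], _, _, total => total
  | p1 :: rest, l2, acc, total =>
      let r := cvAdvance p1.1 l2 acc
      cvLoop rest r.2 r.1 (total + r.1 * p1.2)

def compute_victories_alt (d1 : List (Int × Int)) (d2 : List (Int × Int)) : Int :=
  let items1 := PySem.List.sorted (PySem.Dict.ofList d1).items (fun item => -item.1) false
  let items2 := PySem.List.sorted (PySem.Dict.ofList d2).items (fun item => -item.1) false
  cvLoop items1 items2 0 0

-- ===== PRECONDITION & SPEC =====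
def Spec_compute_victories (d1 : List (Int × Int)) (d2 : List (Int × Int)) (out : Int) : Prop := out = compute_victories_alt d1 d2
instance (d1 : List (Int × Int)) (d2 : List (Int × Int)) (out : Int) : Decidable (Spec_compute_victories d1 d2 out) := by unfold Spec_compute_victories; infer_instance

-- ===== CLAIM (what is proved, stated in full; the proofs are below) =====
def Claim_equal_compute_victories : Prop := ∀ (d1 : List (Int × Int)) (d2 : List (Int × Int)), Dom_compute_victories d1 d2 → Spec_compute_victories d1 d2 (compute_victories d1 d2)

-- ===== LEMMAS AND PROOFS =====

-- step of the truncating fold, and the threshold predicate (shared by both proofs)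
def cvStep (a : Int) (p : Int × Int) : Int := PySem.Int.floordiv (a + p.2) 27

def cvGe (k1 : Int) (p : Int × Int) : Bool := decide (p.1 ≥ k1)

-- cvAdvance folds cvStep over the ≥-k1 prefix and returns the rest
theorem cvAdvance_spec (k1 : Int) (l2 : List (Int × Int)) (acc : Int) :
    cvAdvance k1 l2 acc = ((l2.takeWhile (cvGe k1)).foldl cvStep acc, l2.dropWhile (cvGe k1)) := by
  induction l2 generalizing acc with
  | nil => simp [cvAdvance]
  | cons p t ih =>
      by_cases h : p.1 ≥ k1
      · simp [cvAdvance, h, cvGe, ih, cvStep]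
      · simp [cvAdvance, h, cvGe]

theorem cvIfFold_none (k1 a : Int) (l2 : List (Int × Int)) (h : ∀ p ∈ l2, ¬ p.1 ≥ k1) :
    l2.foldl (fun r p => if p.1 ≥ k1 then cvStep r p else r) a = a := by
  induction l2 generalizing a with
  | nil => rfl
  | cons p t ih =>
      have hp : ¬ p.1 ≥ k1 := h p (by simp)
      simp only [List.foldl_cons, if_neg hp]
      exact ih a (fun q hq => h q (by simp [hq]))

-- on a key-descending list, A's guarded fold is the plain fold over the ≥-k1 prefix
theorem cvIfFold_eq_takeWhile (k1 a : Int) (l2 : List (Int × Int))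
    (hd : l2.Pairwise (fun x y => y.1 ≤ x.1)) :
    l2.foldl (fun r p => if p.1 ≥ k1 then cvStep r p else r) a
      = (l2.takeWhile (cvGe k1)).foldl cvStep a := by
  induction l2 generalizing a with
  | nil => rfl
  | cons p t ih =>
      rcases List.pairwise_cons.mp hd with ⟨hpt, htl⟩
      by_cases h : p.1 ≥ k1
      · rw [List.takeWhile_cons_of_pos (by simpa [cvGe] using h)]
        simp only [List.foldl_cons, if_pos h]
        exact ih (cvStep a p) htl
      · rw [List.takeWhile_cons_of_neg (by simpa [cvGe] using h)]
        simp only [List.foldl_cons, if_neg h, List.foldl_nil]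
        exact cvIfFold_none k1 a t (fun q hq hge => h (le_trans hge (hpt q hq)))

-- lowering the threshold extends the taken prefix across the former drop point
theorem cvTakeWhile_split (k1 k' : Int) (hk : k' ≤ k1) (l2 : List (Int × Int))
    (hd : l2.Pairwise (fun x y => y.1 ≤ x.1)) :
    l2.takeWhile (cvGe k') = l2.takeWhile (cvGe k1) ++ (l2.dropWhile (cvGe k1)).takeWhile (cvGe k') := by
  induction l2 with
  | nil => rfl
  | cons p t ih =>
      rcases List.pairwise_cons.mp hd with ⟨hpt, htl⟩
      by_cases h : p.1 ≥ k1
      · have h' : p.1 ≥ k' := le_trans hk h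
        rw [List.takeWhile_cons_of_pos (by simpa [cvGe] using h'),
          List.takeWhile_cons_of_pos (by simpa [cvGe] using h),
          List.dropWhile_cons_of_pos (by simpa [cvGe] using h), List.cons_append]
        exact congrArg (p :: ·) (ih htl)
      · have hb : cvGe k1 p = false := by simpa [cvGe] using h
        simp [List.takeWhile_cons, hb]

-- loop invariant of B: cvLoop totals, for each threshold, the fold-from-acc over
-- the corresponding prefix of the (descending) remaining list
theorem cvLoop_eq (l1 l2 : List (Int × Int)) (acc tot : Int)
    (hd2 : l2.Pairwise (fun x y => y.1 ≤ x.1))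
    (hd1 : l1.Pairwise (fun x y => y.1 ≤ x.1)) :
    cvLoop l1 l2 acc tot
      = tot + (l1.map (fun p => ((l2.takeWhile (cvGe p.1)).foldl cvStep acc) * p.2)).sum := by
  induction l1 generalizing l2 acc tot with
  | nil => simp [cvLoop]
  | cons p1 rest ih =>
      rcases List.pairwise_cons.mp hd1 with ⟨hpr, hrtl⟩
      have hadv := cvAdvance_spec p1.1 l2 acc
      have hd2' : (l2.dropWhile (cvGe p1.1)).Pairwise (fun x y => y.1 ≤ x.1) :=
        hd2.sublist (List.dropWhile_sublist _)
      simp only [cvLoop, hadv]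
      rw [ih _ _ _ hd2' hrtl]
      have hmap : ∀ q ∈ rest,
          ((l2.dropWhile (cvGe p1.1)).takeWhile (cvGe q.1)).foldl cvStep
              ((l2.takeWhile (cvGe p1.1)).foldl cvStep acc)
            = ((l2.takeWhile (cvGe q.1)).foldl cvStep acc) := by
        intro q hq
        rw [cvTakeWhile_split p1.1 q.1 (hpr q hq) l2 hd2, List.foldl_append]
      rw [List.map_congr_left (fun q hq => by rw [hmap q hq])]
      simp only [List.map_cons, List.sum_cons]
      ring

-- summing A's outer loop
theorem cvSumFold (g : (Int × Int) → Int) (l : List (Int × Int)) (t : Int) :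
    l.foldl (fun nb p => nb + g p) t = t + (l.map g).sum := by
  induction l generalizing t with
  | nil => simp
  | cons p rest ih => simp [List.foldl_cons, ih, add_assoc]

-- ===== VERDICT (by name: the statement is the Claim_ definition above) =====
theorem compute_victories_spec : Claim_equal_compute_victories := by
  intro d1 d2 _
  unfold Spec_compute_victories compute_victories compute_victories_alt
  set s1 := PySem.List.sorted (PySem.Dict.ofList d1).items (fun item => -item.1) false with hs1
  set s2 := PySem.List.sorted (PySem.Dict.ofList d2).items (fun item => -item.1) false with hs2
  have hd1 : s1.Pairwise (fun x y => y.1 ≤ x.1) :=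
    (PySem.List.sorted_pairwise _ _).imp (fun h => by omega)
  have hd2 : s2.Pairwise (fun x y => y.1 ≤ x.1) :=
    (PySem.List.sorted_pairwise _ _).imp (fun h => by omega)
  rw [cvLoop_eq s1 s2 0 0 hd2 hd1, cvSumFold]
  simp only [zero_add]
  exact congrArg _ (List.map_congr_left (fun p _ =>
    congrArg (· * p.2) (cvIfFold_eq_takeWhile p.1 0 s2 hd2)))
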